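-- pv_equiv track=rewrite | github.com/panktishah62/prompt-agent | pricehunter/backend/app/services/query_structurer.py | _fallback_follow_up_questions
-- ===== SOURCE A (Python) =====
-- def _fallback_follow_up_questions(product: str, category: str | None) -> list[str]:
--     normalized = product.lower()
--
--     if "iron" in normalized:
--         return [
--             "Do you need a dry iron, steam iron, garment steamer, or ironing press?",
--             "Any preferred brand, like Philips, Bajaj, Havells, or Usha?",
--             "What budget range should I stay within?",
--             "Any must-have spec like wattage, soleplate type, or travel use?",
--         ]
--
--     if category == "medicine" or any(term in normalized for term in ("paracetamol", "tablet", "capsule", "syrup")):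
--         return [
--             "Which medicine or brand do you need exactly?",
--             "What strength or dosage should I look for, like 500 mg or 650 mg?",
--             "How much quantity do you need?",
--             "Are substitutes okay, or do you need one exact brand?",
--         ]
--
--     if any(term in normalized for term in ("iphone", "phone", "mobile", "smartphone")):
--         return [
--             "Which exact brand and model do you want?",
--             "What storage or RAM variant should I search for?",
--             "Any preferred color?",
--             "What budget range should I stay within?",
--         ]
--
--     return [
--         "Which exact brand or model should I search for?",
--         "What key specification or variant matters most for this item?",
--         "What budget range should I stay within?",
--     ]
-- ===== SOURCE B (Python) =====
-- # Priority-bucket reformulation: one flat keyword->bucket table; collect every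
-- # bucket whose keyword occurs (plus bucket 1 for category "medicine") and index
-- # the questions table by the MINIMUM bucket (default 3 = generic questions).
-- # Correct because A's if-chain picks the lowest-numbered matching group.
--
-- _KEYWORDS = [
--     ("iron", 0),
--     ("paracetamol", 1), ("tablet", 1), ("capsule", 1), ("syrup", 1),
--     ("iphone", 2), ("phone", 2), ("mobile", 2), ("smartphone", 2),
-- ]
--
-- _QUESTIONS = [
--     [
--         "Do you need a dry iron, steam iron, garment steamer, or ironing press?",
--         "Any preferred brand, like Philips, Bajaj, Havells, or Usha?",
--         "What budget range should I stay within?",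
--         "Any must-have spec like wattage, soleplate type, or travel use?",
--     ],
--     [
--         "Which medicine or brand do you need exactly?",
--         "What strength or dosage should I look for, like 500 mg or 650 mg?",
--         "How much quantity do you need?",
--         "Are substitutes okay, or do you need one exact brand?",
--     ],
--     [
--         "Which exact brand and model do you want?",
--         "What storage or RAM variant should I search for?",
--         "Any preferred color?",
--         "What budget range should I stay within?",
--     ],
--     [
--         "Which exact brand or model should I search for?",
--         "What key specification or variant matters most for this item?",
--         "What budget range should I stay within?",
--     ],
-- ]
--
--
-- def _fallback_follow_up_questions(product: str, category: str | None) -> list[str]: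
--     normalized = product.lower()
--     buckets = [b for kw, b in _KEYWORDS if kw in normalized]
--     if category == "medicine":
--         buckets.append(1)
--     return _QUESTIONS[min(buckets, default=3)]
-- ===== Notes on version B (the rewrite author's own statement) =====
-- stated objective: alternative
-- what changed: Replaced the ordered if-chain of grouped predicates with a flat keyword-to-bucket table: collect all matching buckets (category 'medicine' contributes bucket 1) and index a questions table by the minimum bucket, default 3.
import Mathlib
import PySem

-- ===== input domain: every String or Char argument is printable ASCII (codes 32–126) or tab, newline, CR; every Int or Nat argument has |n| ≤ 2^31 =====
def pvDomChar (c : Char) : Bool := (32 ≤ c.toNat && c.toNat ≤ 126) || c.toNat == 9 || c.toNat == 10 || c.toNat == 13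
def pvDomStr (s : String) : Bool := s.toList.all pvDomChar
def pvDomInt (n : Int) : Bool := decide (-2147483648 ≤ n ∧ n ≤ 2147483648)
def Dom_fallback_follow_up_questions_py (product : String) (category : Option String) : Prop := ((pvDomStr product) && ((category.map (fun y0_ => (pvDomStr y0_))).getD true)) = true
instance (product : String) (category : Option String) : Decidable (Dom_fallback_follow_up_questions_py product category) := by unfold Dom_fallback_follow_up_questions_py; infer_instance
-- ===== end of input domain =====

set_option maxHeartbeats 400000


-- B replaces A's ordered if-chain by a flat keyword→bucket table with a min-bucket reduction (objective: alternative).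

-- ===== PORT A =====
-- Literal port of A's if-chain; .lower() = PySem.Str.lower, 'in' = PySem.Str.isIn.
def fallback_follow_up_questions_py (product : String) (category : Option String) : List String :=
  let normalized := PySem.Str.lower product
  if PySem.Str.isIn "iron" normalized then
    ["Do you need a dry iron, steam iron, garment steamer, or ironing press?", "Any preferred brand, like Philips, Bajaj, Havells, or Usha?", "What budget range should I stay within?", "Any must-have spec like wattage, soleplate type, or travel use?"]
  else if category == some "medicine" || ["paracetamol", "tablet", "capsule", "syrup"].any (fun term => PySem.Str.isIn term normalized) then
    ["Which medicine or brand do you need exactly?", "What strength or dosage should I look for, like 500 mg or 650 mg?", "How much quantity do you need?", "Are substitutes okay, or do you need one exact brand?"]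
  else if ["iphone", "phone", "mobile", "smartphone"].any (fun term => PySem.Str.isIn term normalized) then
    ["Which exact brand and model do you want?", "What storage or RAM variant should I search for?", "Any preferred color?", "What budget range should I stay within?"]
  else
    ["Which exact brand or model should I search for?", "What key specification or variant matters most for this item?", "What budget range should I stay within?"]

-- ===== PORT B =====
-- B (mirrors Source B): flat keyword→bucket table; collect every matching bucket (category
-- "medicine" contributes bucket 1), index the questions table by the minimum bucket, default 3.
def pvKeywords : List (String × Nat) :=
  [("iron", 0),
   ("paracetamol", 1), ("tablet", 1), ("capsule", 1), ("syrup", 1),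
   ("iphone", 2), ("phone", 2), ("mobile", 2), ("smartphone", 2)]

def pvQuestions : List (List String) :=
  [ ["Do you need a dry iron, steam iron, garment steamer, or ironing press?", "Any preferred brand, like Philips, Bajaj, Havells, or Usha?", "What budget range should I stay within?", "Any must-have spec like wattage, soleplate type, or travel use?"],
    ["Which medicine or brand do you need exactly?", "What strength or dosage should I look for, like 500 mg or 650 mg?", "How much quantity do you need?", "Are substitutes okay, or do you need one exact brand?"],
    ["Which exact brand and model do you want?", "What storage or RAM variant should I search for?", "Any preferred color?", "What budget range should I stay within?"],
    ["Which exact brand or model should I search for?", "What key specification or variant matters most for this item?", "What budget range should I stay within?"] ]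

-- buckets of Source B: the comprehension, plus bucket 1 when category == "medicine"
def pvBuckets (normalized : String) (category : Option String) : List Nat :=
  if category == some "medicine" then
    ((pvKeywords.filter (fun p => PySem.Str.isIn p.1 normalized)).map Prod.snd) ++ [1]
  else
    (pvKeywords.filter (fun p => PySem.Str.isIn p.1 normalized)).map Prod.snd

def fallback_follow_up_questions_py_alt (product : String) (category : Option String) : List String :=
  let normalized := PySem.Str.lower product
  pvQuestions.getD (match PySem.List.min? (pvBuckets normalized category) (fun x => x) with
                    | some m => m
                    | none => 3) []

-- ===== PRECONDITION & SPEC =====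
def Spec_fallback_follow_up_questions_py (product : String) (category : Option String) (out : List String) : Prop := out = fallback_follow_up_questions_py_alt product category
instance (product : String) (category : Option String) (out : List String) : Decidable (Spec_fallback_follow_up_questions_py product category out) := by unfold Spec_fallback_follow_up_questions_py; infer_instance

-- ===== CLAIM (what is proved, stated in full; the proofs are below) =====
def Claim_equal_fallback_follow_up_questions_py : Prop := ∀ (product : String) (category : Option String), Dom_fallback_follow_up_questions_py product category → Spec_fallback_follow_up_questions_py product category (fallback_follow_up_questions_py product category)

-- ===== LEMMAS AND PROOFS =====

-- Membership characterization: x is a bucket iff x names a group whose condition (exactly A's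
-- three if-conditions) holds.
theorem pvBuckets_mem (n : String) (category : Option String) (x : Nat) :
    x ∈ pvBuckets n category ↔
      (x = 0 ∧ PySem.Str.isIn "iron" n = true)
    ∨ (x = 1 ∧ (category == some "medicine" || ["paracetamol", "tablet", "capsule", "syrup"].any (fun term => PySem.Str.isIn term n)) = true)
    ∨ (x = 2 ∧ (["iphone", "phone", "mobile", "smartphone"].any (fun term => PySem.Str.isIn term n)) = true) := by
  unfold pvBuckets
  constructor
  · intro hx
    have hx' : x ∈ (pvKeywords.filter (fun p => PySem.Str.isIn p.1 n)).map Prod.snd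
        ∨ ((category == some "medicine") = true ∧ x = 1) := by
      by_cases hc : (category == some "medicine") = true
      · rw [if_pos hc, List.mem_append, List.mem_singleton] at hx
        rcases hx with hx | hx
        · exact Or.inl hx
        · exact Or.inr ⟨hc, hx⟩
      · rw [if_neg hc] at hx
        exact Or.inl hx
    rcases hx' with hx0 | ⟨hc, rfl⟩
    · rcases List.mem_map.mp hx0 with ⟨a, haf, rfl⟩
      obtain ⟨hmem9, hpred⟩ := List.mem_filter.mp haf
      simp only [pvKeywords, List.mem_cons, List.not_mem_nil, or_false] at hmem9
      rcases hmem9 with rfl | rfl | rfl | rfl | rfl | rfl | rfl | rfl | rfl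
      · exact Or.inl ⟨rfl, hpred⟩
      · refine Or.inr (Or.inl ⟨rfl, ?_⟩)
        rw [List.any_eq_true.mpr ⟨"paracetamol", by simp, hpred⟩, Bool.or_true]
      · refine Or.inr (Or.inl ⟨rfl, ?_⟩)
        rw [List.any_eq_true.mpr ⟨"tablet", by simp, hpred⟩, Bool.or_true]
      · refine Or.inr (Or.inl ⟨rfl, ?_⟩)
        rw [List.any_eq_true.mpr ⟨"capsule", by simp, hpred⟩, Bool.or_true]
      · refine Or.inr (Or.inl ⟨rfl, ?_⟩)
        rw [List.any_eq_true.mpr ⟨"syrup", by simp, hpred⟩, Bool.or_true]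
      · exact Or.inr (Or.inr ⟨rfl, List.any_eq_true.mpr ⟨"iphone", by simp, hpred⟩⟩)
      · exact Or.inr (Or.inr ⟨rfl, List.any_eq_true.mpr ⟨"phone", by simp, hpred⟩⟩)
      · exact Or.inr (Or.inr ⟨rfl, List.any_eq_true.mpr ⟨"mobile", by simp, hpred⟩⟩)
      · exact Or.inr (Or.inr ⟨rfl, List.any_eq_true.mpr ⟨"smartphone", by simp, hpred⟩⟩)
    · refine Or.inr (Or.inl ⟨rfl, ?_⟩)
      rw [hc, Bool.true_or]
  · intro h
    have hone : ∀ (p : String × Nat), p ∈ pvKeywords → PySem.Str.isIn p.1 n = true →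
        p.2 ∈ (pvKeywords.filter (fun q => PySem.Str.isIn q.1 n)).map Prod.snd :=
      fun p hp hq => List.mem_map.mpr ⟨p, List.mem_filter.mpr ⟨hp, hq⟩, rfl⟩
    have step : ∀ (y : Nat), y ∈ (pvKeywords.filter (fun p => PySem.Str.isIn p.1 n)).map Prod.snd →
        y ∈ (if category == some "medicine" then
              ((pvKeywords.filter (fun p => PySem.Str.isIn p.1 n)).map Prod.snd) ++ [1]
            else (pvKeywords.filter (fun p => PySem.Str.isIn p.1 n)).map Prod.snd) := by
      intro y hy
      by_cases hc : (category == some "medicine") = true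
      · rw [if_pos hc]
        exact List.mem_append_left _ hy
      · rw [if_neg hc]
        exact hy
    rcases h with ⟨rfl, h⟩ | ⟨rfl, h⟩ | ⟨rfl, h⟩
    · exact step 0 (hone ("iron", 0) (by simp [pvKeywords]) h)
    · rw [Bool.or_eq_true] at h
      rcases h with hc | hany
      · rw [if_pos hc, List.mem_append, List.mem_singleton]
        exact Or.inr rfl
      · rcases List.any_eq_true.mp hany with ⟨t, htmem, ht⟩
        simp only [List.mem_cons, List.not_mem_nil, or_false] at htmem
        rcases htmem with rfl | rfl | rfl | rfl
        · exact step 1 (hone ("paracetamol", 1) (by simp [pvKeywords]) ht)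
        · exact step 1 (hone ("tablet", 1) (by simp [pvKeywords]) ht)
        · exact step 1 (hone ("capsule", 1) (by simp [pvKeywords]) ht)
        · exact step 1 (hone ("syrup", 1) (by simp [pvKeywords]) ht)
    · rcases List.any_eq_true.mp h with ⟨t, htmem, ht⟩
      simp only [List.mem_cons, List.not_mem_nil, or_false] at htmem
      rcases htmem with rfl | rfl | rfl | rfl
      · exact step 2 (hone ("iphone", 2) (by simp [pvKeywords]) ht)
      · exact step 2 (hone ("phone", 2) (by simp [pvKeywords]) ht)
      · exact step 2 (hone ("mobile", 2) (by simp [pvKeywords]) ht)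
      · exact step 2 (hone ("smartphone", 2) (by simp [pvKeywords]) ht)

-- If v is a bucket and a lower bound of the buckets, the selected index is v.
theorem pvBuckets_min (n : String) (category : Option String) (v : Nat)
    (hv : v ∈ pvBuckets n category) (hle : ∀ y ∈ pvBuckets n category, v ≤ y) :
    (match PySem.List.min? (pvBuckets n category) (fun x => x) with
     | some m => m
     | none => 3) = v := by
  cases hm : PySem.List.min? (pvBuckets n category) (fun x => x) with
  | none =>
      rw [PySem.List.min?_eq_none_iff] at hm
      rw [hm] at hv
      simp at hv
  | some m =>
      have h1 : m ∈ pvBuckets n category := PySem.List.min?_mem hm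
      have h2 := PySem.List.min?_isMin hm v hv
      have h3 := hle m h1
      simpa using Nat.le_antisymm h2 h3

-- ===== VERDICT (by name: the statement is the Claim_ definition above) =====
theorem fallback_follow_up_questions_py_spec : Claim_equal_fallback_follow_up_questions_py := by
  intro product category _
  simp only [Spec_fallback_follow_up_questions_py, fallback_follow_up_questions_py,
    fallback_follow_up_questions_py_alt]
  have hmem := pvBuckets_mem (PySem.Str.lower product) category
  have hval := pvBuckets_min (PySem.Str.lower product) category
  cases h0 : PySem.Str.isIn "iron" (PySem.Str.lower product) with
  | true =>
      rw [hval 0 ((hmem 0).mpr (Or.inl ⟨rfl, h0⟩)) (fun y _ => Nat.zero_le y)]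
      rfl
  | false =>
      cases hmed : (category == some "medicine" || ["paracetamol", "tablet", "capsule", "syrup"].any (fun term => PySem.Str.isIn term (PySem.Str.lower product))) with
      | true =>
          have hv : (1 : Nat) ∈ pvBuckets (PySem.Str.lower product) category :=
            (hmem 1).mpr (Or.inr (Or.inl ⟨rfl, hmed⟩))
          have hle : ∀ y ∈ pvBuckets (PySem.Str.lower product) category, 1 ≤ y := by
            intro y hy
            rcases (hmem y).mp hy with ⟨rfl, h⟩ | ⟨rfl, _⟩ | ⟨rfl, _⟩
            · rw [h0] at h; cases h
            · exact Nat.le_refl 1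
            · omega
          rw [hval 1 hv hle]
          rfl
      | false =>
          cases hph : (["iphone", "phone", "mobile", "smartphone"].any (fun term => PySem.Str.isIn term (PySem.Str.lower product))) with
          | true =>
              have hv : (2 : Nat) ∈ pvBuckets (PySem.Str.lower product) category :=
                (hmem 2).mpr (Or.inr (Or.inr ⟨rfl, hph⟩))
              have hle : ∀ y ∈ pvBuckets (PySem.Str.lower product) category, 2 ≤ y := by
                intro y hy
                rcases (hmem y).mp hy with ⟨rfl, h⟩ | ⟨rfl, h⟩ | ⟨rfl, _⟩
                · rw [h0] at h; cases h
                · rw [hmed] at h; cases h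
                · exact Nat.le_refl 2
              rw [hval 2 hv hle]
              rfl
          | false =>
              have hnil : pvBuckets (PySem.Str.lower product) category = [] := by
                rw [List.eq_nil_iff_forall_not_mem]
                intro x hx
                rcases (hmem x).mp hx with ⟨rfl, h⟩ | ⟨rfl, h⟩ | ⟨rfl, h⟩
                · rw [h0] at h; cases h
                · rw [hmed] at h; cases h
                · rw [hph] at h; cases h
              rw [hnil]
              rfl
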